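-- pv_equiv track=rewrite | github.com/Quayle57/anagram-finder | trololo.py | generate_regex
-- ===== SOURCE A (Python) =====
-- def generate_regex(input, poss):
--     # poss = '.'
--     res = ""
--     nb = 0
--     for i in input:
--         if i == '*':
--             nb += 1
--         else:
--             if nb is not 0:
--                 res += poss + '{%d}' % nb
--             nb = 0
--             res += i
--     if nb is not 0:
--         res += poss + '{%d}' % nb
--     return res
-- ===== SOURCE B (Python) =====
-- def generate_regex(input, poss):
--     parts = []
--     i, n = 0, len(input)
--     while i < n:
--         if input[i] == '*':
--             j = i
--             while j < n and input[j] == '*':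
--                 j += 1
--             parts.append(poss + '{%d}' % (j - i))
--             i = j
--         else:
--             parts.append(input[i])
--             i += 1
--     return ''.join(parts)
-- ===== Notes on version B (the rewrite author's own statement) =====
-- stated objective: alternative
-- what changed: B consumes each maximal run of '*' with an inner index scan and joins collected parts at the end, instead of A's per-character loop carrying a pending star counter with a trailing flush.
import Mathlib
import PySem

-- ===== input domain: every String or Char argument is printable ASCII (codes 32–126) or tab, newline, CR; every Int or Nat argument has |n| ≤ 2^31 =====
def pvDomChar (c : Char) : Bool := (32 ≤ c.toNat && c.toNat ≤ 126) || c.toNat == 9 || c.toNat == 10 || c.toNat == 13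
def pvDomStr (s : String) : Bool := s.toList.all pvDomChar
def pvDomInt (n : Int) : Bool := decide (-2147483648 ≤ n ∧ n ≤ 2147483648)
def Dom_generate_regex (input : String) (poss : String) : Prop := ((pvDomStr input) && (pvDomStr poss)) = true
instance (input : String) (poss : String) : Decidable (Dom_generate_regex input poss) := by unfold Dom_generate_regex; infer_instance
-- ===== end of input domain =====

-- B replaces A's per-character loop with pending-star counter and trailing flush by a
-- run-consuming scan that emits each maximal '*' run at once (alternative decomposition).

-- ===== PORT A =====
-- the for-loop of A: state (res, nb); the [] case is the code after the loop (final flush)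
def pvALoop (poss : List Char) (res : List Char) (nb : Int) : List Char → List Char
  | [] => if nb ≠ 0 then res ++ poss ++ '{' :: (PySem.Int.toStr nb).toList ++ ['}'] else res
  | i :: rest =>
    if i = '*' then pvALoop poss res (nb + 1) rest
    else pvALoop poss
      ((if nb ≠ 0 then res ++ poss ++ '{' :: (PySem.Int.toStr nb).toList ++ ['}'] else res) ++ [i])
      0 rest

def generate_regex (input : String) (poss : String) : String :=
  String.mk (pvALoop poss.toList [] 0 input.toList)

-- ===== PORT B =====
-- Source B's outer while: on a '*' the inner while consumes the maximal run (takeWhile/dropWhile),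
-- one part is emitted per step; the parts are concatenated as they are produced (= ''.join).
def pvBScan (poss : List Char) : List Char → List Char
  | [] => []
  | c :: rest =>
    if c = '*' then
      poss ++ '{' :: (PySem.Int.toStr (((c :: rest).takeWhile (· = '*')).length : Int)).toList
        ++ ['}'] ++ pvBScan poss ((c :: rest).dropWhile (· = '*'))
    else c :: pvBScan poss rest
termination_by l => l.length
decreasing_by
  · simp only [List.dropWhile_cons, *, decide_true, if_true, List.length_cons]
    exact Nat.lt_succ_of_le (List.length_dropWhile_le _ _)
  · simp

def generate_regex_alt (input : String) (poss : String) : String :=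
  String.mk (pvBScan poss.toList input.toList)

-- ===== PRECONDITION & SPEC =====
def Spec_generate_regex (input : String) (poss : String) (out : String) : Prop := out = generate_regex_alt input poss
instance (input : String) (poss : String) (out : String) : Decidable (Spec_generate_regex input poss out) := by unfold Spec_generate_regex; infer_instance

-- ===== CLAIM (what is proved, stated in full; the proofs are below) =====
def Claim_equal_generate_regex : Prop := ∀ (input : String) (poss : String), Dom_generate_regex input poss → Spec_generate_regex input poss (generate_regex input poss)

-- ===== LEMMAS AND PROOFS =====
lemma pv_tw (n : Nat) (l : List Char) :
    (List.replicate n '*' ++ l).takeWhile (· = '*') = List.replicate n '*' ++ l.takeWhile (· = '*') := by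
  induction n with
  | zero => simp
  | succ m ih => simp [List.replicate_succ, ih]

lemma pv_dw (n : Nat) (l : List Char) :
    (List.replicate n '*' ++ l).dropWhile (· = '*') = l.dropWhile (· = '*') := by
  induction n with
  | zero => simp
  | succ m ih => simp [List.replicate_succ, ih]

lemma pvBScan_cons_star (poss : List Char) (rest : List Char) :
    pvBScan poss ('*' :: rest) =
      poss ++ '{' :: (PySem.Int.toStr ((('*' :: rest).takeWhile (· = '*')).length : Int)).toList
        ++ ['}'] ++ pvBScan poss (('*' :: rest).dropWhile (· = '*')) := by
  rw [pvBScan]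
  simp

lemma pvBScan_cons_nonstar (poss : List Char) (c : Char) (rest : List Char) (h : ¬ c = '*') :
    pvBScan poss (c :: rest) = c :: pvBScan poss rest := by
  rw [pvBScan]
  simp [h]

lemma pv_main (poss : List Char) (l : List Char) : ∀ (res : List Char) (n : Nat),
    pvALoop poss res (n : Int) l = res ++ pvBScan poss (List.replicate n '*' ++ l) := by
  induction l with
  | nil =>
    intro res n
    cases n with
    | zero => simp [pvALoop, pvBScan]
    | succ m =>
      have h : ((m + 1 : Nat) : Int) ≠ 0 := by omega
      simp only [pvALoop, h, if_true, List.append_nil, ne_eq, not_false_eq_true]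
      rw [List.replicate_succ, pvBScan]
      have htw := pv_tw (m + 1) ([] : List Char)
      have hdw := pv_dw (m + 1) ([] : List Char)
      simp only [List.append_nil] at htw hdw
      rw [List.replicate_succ] at htw hdw
      simp [htw, hdw, pvBScan, List.append_assoc]
  | cons i rest ih =>
    intro res n
    by_cases hi : i = '*'
    · subst hi
      have h1 : pvALoop poss res (n : Int) ('*' :: rest) = pvALoop poss res ((n : Int) + 1) rest := by
        simp [pvALoop]
      have h2 : ((n : Int) + 1) = ((n + 1 : Nat) : Int) := by push_cast; ring
      rw [h1, h2, ih res (n + 1)]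
      congr 1
      simp [List.replicate_succ', List.append_assoc]
    · cases n with
      | zero =>
        have h1 : pvALoop poss res ((0 : Nat) : Int) (i :: rest) = pvALoop poss (res ++ [i]) ((0 : Nat) : Int) rest := by
          simp [pvALoop, hi]
        rw [h1, ih (res ++ [i]) 0]
        simp only [List.replicate, List.nil_append]
        rw [pvBScan_cons_nonstar poss i rest hi]
        simp
      | succ m =>
        have hz : ¬ ((m : Int) + 1 = 0) := by omega
        have h1 : pvALoop poss res ((m + 1 : Nat) : Int) (i :: rest) =
            pvALoop poss (res ++ poss ++ '{' :: (PySem.Int.toStr ((m + 1 : Nat) : Int)).toList ++ ['}'] ++ [i]) ((0 : Nat) : Int) rest := by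
          simp [pvALoop, hi, if_neg hz, List.append_assoc]
        rw [h1, ih _ 0]
        rw [List.replicate_succ, List.cons_append, pvBScan_cons_star]
        simp [pv_tw m (i :: rest), pv_dw m (i :: rest), hi, pvBScan, List.append_assoc]

-- ===== VERDICT (by name: the statement is the Claim_ definition above) =====
theorem generate_regex_spec : Claim_equal_generate_regex := by
  intro input poss _
  show generate_regex input poss = generate_regex_alt input poss
  unfold generate_regex generate_regex_alt
  have := pv_main poss.toList input.toList [] 0
  simpa using congrArg String.mk this
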